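-- pv_equiv track=rewrite | github.com/Casxt/SortReference | sort_reference/SortReference.py | ReorderReference
-- ===== SOURCE A (Python) =====
-- def ReorderReference(ref_order):
--     """
--     count reference usage
--     sort reference to new order by using order
--     """
--     count = {}
--     new_id = {}
--     for ref in ref_order:
--         if ref in count:
--             count[ref] += 1
--         else:
--             count[ref] = 1
--             new_id[ref] = str(len(count))
--     return count, new_id
-- ===== SOURCE B (Python) =====
-- def ReorderReference(ref_order):
--     """
--     count reference usage
--     sort reference to new order by using order
--     """
--     count = {}
--     for ref in ref_order:
--         count[ref] = count.get(ref, 0) + 1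
--     new_id = {ref: str(i + 1) for i, ref in enumerate(count)}
--     return count, new_id
-- ===== Notes on version B (the rewrite author's own statement) =====
-- stated objective: idiomatic
-- what changed: Replaced A's single pass that interleaves counting with branch-guarded id assignment by two separate passes: a branch-free counting loop, then a dict comprehension over the distinct keys in first-appearance order assigning str(i+1) by enumerate.
import Mathlib
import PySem

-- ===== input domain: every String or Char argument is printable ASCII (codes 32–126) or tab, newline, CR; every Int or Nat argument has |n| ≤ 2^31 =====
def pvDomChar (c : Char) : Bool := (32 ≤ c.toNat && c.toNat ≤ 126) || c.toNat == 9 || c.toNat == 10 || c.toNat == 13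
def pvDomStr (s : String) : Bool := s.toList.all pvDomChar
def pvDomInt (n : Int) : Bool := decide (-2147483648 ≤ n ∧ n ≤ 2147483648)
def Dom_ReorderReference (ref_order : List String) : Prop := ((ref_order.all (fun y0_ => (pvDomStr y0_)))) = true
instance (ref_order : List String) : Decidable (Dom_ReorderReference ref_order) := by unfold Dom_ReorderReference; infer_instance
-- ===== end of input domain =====

-- B replaces A's single branching pass by two passes: a branch-free counting loop, then
-- an id-assignment pass over the distinct keys in first-appearance order (idiomatic; not faster).

-- ===== PORT A =====
def ReorderReference (ref_order : List String) : (List (String × Int)) × (List (String × String)) :=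
  let st := ref_order.foldl
    (fun (st : PySem.Dict String Int × PySem.Dict String String) ref =>
      if st.1.contains ref then
        (st.1.modify ref 0 (· + 1), st.2)
      else
        let count' := st.1.insert ref 1
        (count', st.2.insert ref (PySem.Int.toStr (count'.size : Int))))
    (PySem.Dict.empty, PySem.Dict.empty)
  (st.1.items, st.2.items)

-- ===== PORT B =====
def ReorderReference_alt (ref_order : List String) : (List (String × Int)) × (List (String × String)) :=
  let count := ref_order.foldl (fun d r => d.insert r (d.getD r 0 + 1)) PySem.Dict.empty
  let new_id := (PySem.List.enumerate count.keys 0).foldl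
    (fun (d : PySem.Dict String String) p => d.insert p.2 (PySem.Int.toStr (p.1 + 1)))
    PySem.Dict.empty
  (count.items, new_id.items)

-- ===== PRECONDITION & SPEC =====
def Spec_ReorderReference (ref_order : List String) (out : (List (String × Int)) × (List (String × String))) : Prop := out = ReorderReference_alt ref_order
instance (ref_order : List String) (out : (List (String × Int)) × (List (String × String))) : Decidable (Spec_ReorderReference ref_order out) := by unfold Spec_ReorderReference; infer_instance

-- ===== CLAIM (what is proved, stated in full; the proofs are below) =====
def Claim_equal_ReorderReference : Prop := ∀ (ref_order : List String), Dom_ReorderReference ref_order → Spec_ReorderReference ref_order (ReorderReference ref_order)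

-- ===== LEMMAS AND PROOFS =====

-- the id table A maintains, characterised by the count dict's key order
def pvMkIds (ks : List String) : List (String × String) :=
  (PySem.List.enumerate ks 0).map (fun p => (p.2, PySem.Int.toStr (p.1 + 1)))

theorem pvMkIds_append_singleton (ks : List String) (x : String) :
    pvMkIds (ks ++ [x]) = pvMkIds ks ++ [(x, PySem.Int.toStr ((ks.length : Int) + 1))] := by
  simp [pvMkIds, PySem.List.enumerate_append, PySem.List.enumerate_cons, PySem.List.enumerate_nil]

theorem pvMkIds_keys (ks : List String) : (pvMkIds ks).map (·.1) = ks := by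
  have h := PySem.List.map_snd_enumerate ks 0
  simp only [pvMkIds, List.map_map]
  exact h

-- invariant of A's loop: first component follows the counter fold, second stays pvMkIds of its keys
theorem pvAinv (l : List String) (cd : PySem.Dict String Int) (nd : PySem.Dict String String)
    (hnd : cd.keys.Nodup) (hitems : nd.items = pvMkIds cd.keys) :
    (l.foldl
      (fun (st : PySem.Dict String Int × PySem.Dict String String) ref =>
        if st.1.contains ref then
          (st.1.modify ref 0 (· + 1), st.2)
        else
          let count' := st.1.insert ref 1
          (count', st.2.insert ref (PySem.Int.toStr (count'.size : Int))))
      (cd, nd)) =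
    (l.foldl (fun d x => d.modify x 0 (· + 1)) cd,
     l.foldl (fun d x => d.modify x 0 (· + 1)) cd
       |>.keys |> pvMkIds |> PySem.Dict.mk) := by
  induction l generalizing cd nd with
  | nil =>
    simp only [List.foldl_nil]
    have : nd = PySem.Dict.mk (pvMkIds cd.keys) := by
      apply PySem.Dict.ext; simpa using hitems
    rw [this]
  | cons x l ih =>
    simp only [List.foldl_cons]
    by_cases h : cd.contains x = true
    · simp only [h, if_true]
      have hkeys : (cd.modify x 0 (· + 1)).keys = cd.keys := by
        rw [PySem.Dict.keys_modify, PySem.Dict.keys_insert_of_contains _ _ h]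
      exact ih (cd.modify x 0 (· + 1)) nd (hkeys ▸ hnd) (hkeys ▸ hitems)
    · have h' : cd.contains x = false := by simpa using h
      simp only [h', Bool.false_eq_true, if_false]
      have hmod : cd.modify x 0 (· + 1) = cd.insert x 1 := by
        show cd.insert x (cd.getD x 0 + 1) = cd.insert x 1
        rw [PySem.Dict.getD_of_not_contains cd 0 h']; norm_num
      have hxmem : x ∉ cd.keys := by
        rw [PySem.Dict.contains_eq_decide_mem_keys] at h'
        simpa using h'
      have hkeys' : (cd.insert x 1).keys = cd.keys ++ [x] :=
        PySem.Dict.keys_insert_of_not_contains cd 1 h'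
      have hnd' : (cd.insert x 1).keys.Nodup := by
        rw [hkeys']
        refine List.Nodup.append hnd (List.nodup_singleton x) ?_
        simp [List.disjoint_singleton, hxmem]
      have hndx : nd.contains x = false := by
        rw [PySem.Dict.contains_eq_decide_mem_keys]
        have : nd.keys = cd.keys := by
          have := pvMkIds_keys cd.keys
          simp only [PySem.Dict.keys, hitems]; exact this
        simp [this, hxmem]
      have hsize : ((cd.insert x 1).size : Int) = (cd.keys.length : Int) + 1 := by
        have h1 : (cd.insert x 1).size = (cd.insert x 1).keys.length := by
          simp [PySem.Dict.size, PySem.Dict.keys]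
        rw [h1, hkeys']; simp
      have hitems' : (nd.insert x (PySem.Int.toStr ((cd.insert x 1).size : Int))).items
          = pvMkIds (cd.insert x 1).keys := by
        rw [PySem.Dict.items_insert_of_not_contains nd _ hndx, hitems, hkeys',
          pvMkIds_append_singleton, hsize]
      rw [hmod]
      exact ih (cd.insert x 1) _ hnd' hitems'

-- B's count fold is the counter, and its id fold materialises pvMkIds
theorem pvBnewid (ks : List String) (hnd : ks.Nodup) :
    ((PySem.List.enumerate ks 0).foldl
      (fun (d : PySem.Dict String String) p => d.insert p.2 (PySem.Int.toStr (p.1 + 1)))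
      PySem.Dict.empty).items = pvMkIds ks := by
  have h := PySem.Dict.items_foldl_insert_fresh (ν := String)
    (PySem.List.enumerate ks 0) (fun p => p.2) (fun p => PySem.Int.toStr (p.1 + 1))
    PySem.Dict.empty (by intro a _; simp [PySem.Dict.contains_empty])
    (by rw [PySem.List.map_snd_enumerate]; exact hnd)
  simpa [pvMkIds, PySem.Dict.items] using h

-- ===== VERDICT (by name: the statement is the Claim_ definition above) =====
theorem ReorderReference_spec : Claim_equal_ReorderReference := by
  intro ref_order _
  unfold Spec_ReorderReference ReorderReference ReorderReference_alt
  simp only []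
  have hA := pvAinv ref_order PySem.Dict.empty PySem.Dict.empty
    (by simp [PySem.Dict.keys_empty]) (by rfl)
  rw [hA]
  have hcnt := PySem.Dict.foldl_insert_getD_add_one_eq_counter (κ := String) ref_order
  rw [PySem.Dict.counter_eq_foldl] at hcnt
  rw [hcnt]
  have hCnodup : (List.foldl (fun (d : PySem.Dict String Int) x => d.modify x 0 (· + 1))
      PySem.Dict.empty ref_order).keys.Nodup := by
    rw [← PySem.Dict.counter_eq_foldl]
    exact PySem.Dict.nodup_keys_counter ref_order
  rw [pvBnewid _ hCnodup]
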